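-- pv_equiv track=rewrite | github.com/ztz1995/CGMD | pyMD/collective_structure_class.py | sort_types
-- ===== SOURCE A (Python) =====
-- def sort_types(type_tuple):
--     max_iter = int(len(type_tuple) / 2)
--     for iter_ in range(max_iter):
--         if type_tuple[iter_] < type_tuple[-iter_ - 1]:
--             return type_tuple, False
--         elif type_tuple[iter_] > type_tuple[-iter_ - 1]:
--             return type_tuple[::-1], True
--         elif iter_ == max_iter - 1:
--             return type_tuple[::-1], True
-- ===== SOURCE B (Python) =====
-- def sort_types(type_tuple):
--     rev = type_tuple[::-1]
--     return (type_tuple, False) if type_tuple < rev else (rev, True)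
-- ===== Notes on version B (the rewrite author's own statement) =====
-- stated objective: simpler
-- what changed: Replaces A's two-ended index loop over the first half (with three-way branch and last-iteration special case) by one whole-sequence lexicographic comparison of the tuple with its reversal.
-- outside the precondition, e.g. on sort_types(()): A returns None, B returns ((), True); on sort_types(('a',)): A returns None, B returns (('a',), True)
import Mathlib
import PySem

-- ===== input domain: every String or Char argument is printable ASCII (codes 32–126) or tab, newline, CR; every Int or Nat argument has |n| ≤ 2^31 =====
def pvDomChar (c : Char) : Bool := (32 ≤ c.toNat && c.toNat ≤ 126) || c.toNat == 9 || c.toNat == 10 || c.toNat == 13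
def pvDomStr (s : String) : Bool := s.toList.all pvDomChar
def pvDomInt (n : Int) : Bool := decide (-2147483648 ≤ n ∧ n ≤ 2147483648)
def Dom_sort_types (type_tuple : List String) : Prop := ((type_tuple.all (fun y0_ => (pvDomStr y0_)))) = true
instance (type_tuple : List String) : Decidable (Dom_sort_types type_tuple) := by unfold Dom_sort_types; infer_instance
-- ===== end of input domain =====

-- B replaces A's two-ended early-exit index loop over the first half by a single
-- lexicographic comparison of the list with its reversal (objective: simpler).

-- ===== PORT A =====
-- the for-loop over range(max_iter) with early returns; the fall-through
-- (reached only when max_iter = 0, i.e. outside Pre_) is where Python returns None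
def sortTypesLoop (tt : List String) (maxIter : Nat) (i : Nat) : List String × Bool :=
  if i < maxIter then
    let a := (PySem.List.pyGet? tt (i : Int)).getD ""          -- type_tuple[iter_]
    let b := (PySem.List.pyGet? tt (-(i : Int) - 1)).getD ""   -- type_tuple[-iter_ - 1]
    if a < b then (tt, false)
    else if b < a then (tt.reverse, true)                      -- type_tuple[::-1] = reverse (PySem.List.slice?_none_none_neg_one)
    else if i = maxIter - 1 then (tt.reverse, true)
    else sortTypesLoop tt maxIter (i + 1)
  else (tt, false)   -- loop exhausted: Python returns None here (excluded by Pre_)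
termination_by maxIter - i

def sort_types (type_tuple : List String) : List String × Bool :=
  sortTypesLoop type_tuple (type_tuple.length / 2) 0   -- max_iter = int(len/2) = len // 2 for len ≥ 0

-- ===== PORT B =====
-- Python's '<' on lists of strings: lexicographic, exact (string '<' is code-point order)
def pyListLt : List String → List String → Bool
  | [], [] => false
  | [], _ :: _ => true
  | _ :: _, [] => false
  | a :: as, b :: bs => if a < b then true else if b < a then false else pyListLt as bs

def sort_types_alt (type_tuple : List String) : List String × Bool :=
  let rev := type_tuple.reverse                                -- type_tuple[::-1]
  if pyListLt type_tuple rev then (type_tuple, false) else (rev, true)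

-- ===== PRECONDITION & SPEC =====
-- Pre_ excludes lists of length < 2: there A's loop body never runs and A falls
-- through returning None, which is not a value of the declared pair type.
def Pre_sort_types (type_tuple : List String) : Prop := 2 ≤ type_tuple.length
instance (type_tuple : List String) : Decidable (Pre_sort_types type_tuple) := by
  unfold Pre_sort_types; infer_instance
def pvWitness_sort_types : List String := ["b", "a"]

def Spec_sort_types (type_tuple : List String) (out : List String × Bool) : Prop := out = sort_types_alt type_tuple
instance (type_tuple : List String) (out : List String × Bool) : Decidable (Spec_sort_types type_tuple out) := by unfold Spec_sort_types; infer_instance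

-- ===== CLAIM (what is proved, stated in full; the proofs are below) =====
def Claim_equal_sort_types : Prop := ∀ (type_tuple : List String), Dom_sort_types type_tuple → Pre_sort_types type_tuple → Spec_sort_types type_tuple (sort_types type_tuple)

-- ===== LEMMAS AND PROOFS =====

theorem pyListLt_irrefl : ∀ xs : List String, pyListLt xs xs = false := by
  intro xs
  induction xs with
  | nil => rfl
  | cons x xs ih => simp [pyListLt, ih]

theorem pyListLt_drop (n : Nat) : ∀ xs ys : List String, xs.take n = ys.take n →
    pyListLt xs ys = pyListLt (xs.drop n) (ys.drop n) := by
  induction n with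
  | zero => intro xs ys _; simp
  | succ n ih =>
    intro xs ys h
    match xs, ys with
    | [], [] => rfl
    | [], _ :: _ => simp [List.take_succ_cons] at h
    | _ :: _, [] => simp [List.take_succ_cons] at h
    | x :: xs, y :: ys =>
      simp only [List.take_succ_cons, List.cons.injEq] at h
      obtain ⟨rfl, h2⟩ := h
      simp only [List.drop_succ_cons, pyListLt, lt_irrefl, if_false]
      exact ih xs ys h2

theorem palindrome_of_half (tt : List String)
    (h : ∀ j, j < tt.length / 2 → ∀ (h1 : j < tt.length) (h2 : tt.length - 1 - j < tt.length),
      tt[j] = tt[tt.length - 1 - j]) : tt.reverse = tt := by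
  apply List.ext_getElem (by simp)
  intro j h1 h2
  rw [List.getElem_reverse]
  by_cases hj : j < tt.length / 2
  · exact (h j hj (by omega) (by omega)).symm
  · by_cases hm : tt.length - 1 - j = j
    · simp only [hm]
    · have hk : tt.length - 1 - j < tt.length / 2 := by omega
      have := h _ hk (by omega) (by omega)
      have he : tt.length - 1 - (tt.length - 1 - j) = j := by omega
      simp only [he] at this
      exact this

-- the loop, started at i with the first i symmetric pairs known equal, computes B's answer
theorem loop_eq (tt : List String) (hlen : 2 ≤ tt.length) :
    ∀ k i, tt.length / 2 - i = k → i < tt.length / 2 → tt.take i = tt.reverse.take i →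
      sortTypesLoop tt (tt.length / 2) i = sort_types_alt tt := by
  intro k
  induction k with
  | zero => intro i hk hi _; omega
  | succ k ih =>
    intro i hk hi hinv
    have hi1 : i < tt.length := by omega
    have hi2 : tt.length - 1 - i < tt.length := by omega
    have ha : (PySem.List.pyGet? tt (i : Int)).getD "" = tt[i] := by
      rw [PySem.List.pyGet?_natCast, List.getElem?_eq_getElem hi1]; rfl
    have hcast : -(i : Int) - 1 = -(((i + 1 : Nat) : Int)) := by push_cast; ring
    have hb : (PySem.List.pyGet? tt (-(i : Int) - 1)).getD "" = tt[tt.length - 1 - i] := by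
      rw [hcast, PySem.List.pyGet?_neg_natCast tt (i + 1) (by omega) (by omega)]
      have : tt.length - (i + 1) = tt.length - 1 - i := by omega
      rw [this, List.getElem?_eq_getElem hi2]; rfl
    have hdrop1 : tt.drop i = tt[i] :: tt.drop (i + 1) := List.drop_eq_getElem_cons hi1
    have hri : i < tt.reverse.length := by simpa using hi1
    have hdrop2 : tt.reverse.drop i = tt[tt.length - 1 - i] :: tt.reverse.drop (i + 1) := by
      rw [List.drop_eq_getElem_cons hri, List.getElem_reverse]
    rw [sortTypesLoop, if_pos hi, ha, hb]
    by_cases hab : tt[i] < tt[tt.length - 1 - i]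
    · rw [if_pos hab]
      have hlt : pyListLt tt tt.reverse = true := by
        rw [pyListLt_drop i tt tt.reverse hinv, hdrop1, hdrop2]
        simp [pyListLt, hab]
      simp [sort_types_alt, hlt]
    · rw [if_neg hab]
      by_cases hba : tt[tt.length - 1 - i] < tt[i]
      · rw [if_pos hba]
        have hlt : pyListLt tt tt.reverse = false := by
          rw [pyListLt_drop i tt tt.reverse hinv, hdrop1, hdrop2]
          simp [pyListLt, hab, hba]
        simp [sort_types_alt, hlt]
      · -- the pair is equal
        rw [if_neg hba]
        have heq : tt[i] = tt[tt.length - 1 - i] := le_antisymm (not_lt.1 hba) (not_lt.1 hab)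
        have hinv' : tt.take (i + 1) = tt.reverse.take (i + 1) := by
          rw [List.take_add_one, List.take_add_one, hinv, List.getElem?_eq_getElem hi1,
            List.getElem?_eq_getElem hri, List.getElem_reverse, heq]
        by_cases hlast : i = tt.length / 2 - 1
        · rw [if_pos hlast]
          -- all symmetric pairs in the first half are equal: tt is a palindrome
          have hpal : tt.reverse = tt := by
            apply palindrome_of_half
            intro j hj h1 h2
            by_cases hji : j < i
            · have := congrArg (fun l => l[j]?) hinv
              simp only [List.getElem?_take_of_lt hji, List.getElem?_eq_getElem h1,
                List.getElem?_eq_getElem (by simpa using h1 : j < tt.reverse.length)] at this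
              have := Option.some.inj this
              rwa [List.getElem_reverse] at this
            · have : j = i := by omega
              subst this; exact heq
          have hlt : pyListLt tt tt.reverse = false := by rw [hpal]; exact pyListLt_irrefl tt
          simp [sort_types_alt, hlt]
        · rw [if_neg hlast]
          exact ih (i + 1) (by omega) (by omega) hinv'

-- ===== VERDICT (by name: the statement is the Claim_ definition above) =====
theorem sort_types_spec : Claim_equal_sort_types := by
  intro tt _ hpre
  unfold Spec_sort_types sort_types
  have h2 : 2 ≤ tt.length := hpre
  exact loop_eq tt h2 (tt.length / 2 - 0) 0 rfl (by omega) (by simp)
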